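-- pv_equiv track=rewrite | github.com/sophgo/tpu-mlir | python/tools/riscv_code_opt.py | find_repeated_subarrays
-- ===== SOURCE A (Python) =====
-- def remove_pure_gdma(index_arr, arr):
--     new_index_arr = []
--     start_set = set()
--     for index in index_arr:
--         if index[1] <= 1:
--             continue
--         if index[0] in start_set:
--             continue
--         count = 0
--         for i in range(index[0], index[0] + index[1]):
--             if arr[i].startswith('sg.dma'):
--                 count += 1
--         if count != index[1]:
--             start_set.add(index[0])
--             new_index_arr.append(index)
--     return new_index_arr
--
-- def find_repeated_subarrays(arr):
--     n = len(arr)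
--     result = []
--
--     # check overlap
--     def is_overlapping(new_start, new_length, new_count):
--         new_end = new_start + new_length * new_count
--         for start, length, count in result:
--             end = start + length * count
--             if not (new_end <= start or new_start >= end):
--                 return True
--         return False
--
--     # find all possible for-loop
--     i = 0
--     while i < n:
--         max_length = 0
--         max_count = 0
--         max_start = i
--
--         # try different length
--         for length in range(1, n - i + 1):
--             count = 1
--             while i + count * length < n and arr[i:i+length] == arr[i+length*count:i+length*(count+1)]:
--                 count += 1
--             if count > 1 and length * count > max_length * max_count:
--                 if not is_overlapping(i, length, count):
--                     max_length = length
--                     max_count = count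
--                     max_start = i
--
--         # record
--         if max_length > 0 and max_count > 1:
--             result.append((max_start, max_length, max_count))
--             i = max_start + max_length * max_count - 1  # 跳过当前记录的子数组
--
--         i += 1
--     return remove_pure_gdma(result, arr)
-- ===== SOURCE B (Python) =====
-- def find_repeated_subarrays(arr):
--     n = len(arr)
--     # lcp table: rows[a][b] = length of the longest common prefix of arr[a:] and arr[b:]
--     rows = [[0] * (n + 1)]
--     for a in reversed(range(n)):
--         prev = rows[0]
--         cur = [(prev[b + 1] + 1) if arr[a] == arr[b] else 0 for b in range(n)]
--         cur.append(0)
--         rows = [cur] + rows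
--
--     result = []
--     i = 0
--     while i < n:
--         best_len = 0
--         best_cnt = 0
--         for length in range(1, n - i + 1):
--             cnt = 1 + rows[i][i + length] // length
--             if cnt > 1 and length * cnt > best_len * best_cnt:
--                 best_len = length
--                 best_cnt = cnt
--         if best_len > 0:
--             result.append((i, best_len, best_cnt))
--             i += best_len * best_cnt
--         else:
--             i += 1
--
--     return [(s, l, c) for (s, l, c) in result
--             if l > 1 and not all(x.startswith('sg.dma') for x in arr[s:s + l])]
-- ===== Notes on version B (the rewrite author's own statement) =====
-- stated objective: faster
-- what changed: B precomputes an O(n^2) longest-common-prefix (suffix-lcp) table once, so each repeat count is a single table lookup 1+lcp//length instead of A's repeated slice comparisons; B also drops A's always-false overlap scan and its redundant start_set, replacing remove_pure_gdma with a plain filter comprehension.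
import Mathlib
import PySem

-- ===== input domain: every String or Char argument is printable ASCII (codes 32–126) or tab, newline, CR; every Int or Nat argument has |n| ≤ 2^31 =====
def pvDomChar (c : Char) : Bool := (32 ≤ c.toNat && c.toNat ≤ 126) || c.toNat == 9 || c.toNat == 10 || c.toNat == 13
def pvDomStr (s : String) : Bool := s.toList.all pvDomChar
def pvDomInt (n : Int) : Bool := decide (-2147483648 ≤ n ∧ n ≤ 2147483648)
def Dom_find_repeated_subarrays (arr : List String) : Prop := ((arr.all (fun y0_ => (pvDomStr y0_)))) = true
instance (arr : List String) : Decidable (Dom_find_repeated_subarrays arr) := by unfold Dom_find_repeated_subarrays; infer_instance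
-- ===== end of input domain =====

-- B replaces A's repeated slice comparisons by one precomputed suffix-lcp table (each repeat count
-- becomes a single table lookup) and drops A's always-false overlap scan and its redundant start_set.

-- ===== PORT A =====
-- inner 'while i + count*length < n and arr[i:i+length] == arr[...]' loop of A
def aCountLoop (arr : List String) (i L : Int) (fuel : Nat) (count : Int) : Int :=
  match fuel with
  | 0 => count
  | f + 1 =>
    if i + count * L < (arr.length : Int) ∧
        PySem.List.slice arr (some i) (some (i + L)) =
          PySem.List.slice arr (some (i + L * count)) (some (i + L * (count + 1)))
    then aCountLoop arr i L f (count + 1)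
    else count

-- A's is_overlapping (early-return-True loop = List.any)
def aOverlap (result : List (Int × Int × Int)) (ns nl nc : Int) : Bool :=
  result.any (fun t => !(decide (ns + nl * nc ≤ t.1) || decide (t.1 + t.2.1 * t.2.2 ≤ ns)))

-- A's 'for length in range(1, n-i+1)' loop; state = (max_length, max_count, max_start)
def aTry (arr : List String) (result : List (Int × Int × Int)) (i : Int) : Int × Int × Int :=
  (PySem.List.pyRange 1 ((arr.length : Int) - i + 1) 1).foldl
    (fun m L =>
      let count := aCountLoop arr i L (arr.length + 1) 1
      if count > 1 ∧ L * count > m.1 * m.2.1 then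
        if aOverlap result i L count = false then (L, count, i) else m
      else m)
    (0, 0, i)

-- A's outer 'while i < n' loop (i strictly increases each pass, so fuel n+1 suffices)
def aMain (arr : List String) (fuel : Nat) (i : Int) (result : List (Int × Int × Int)) :
    List (Int × Int × Int) :=
  match fuel with
  | 0 => result
  | f + 1 =>
    if i < (arr.length : Int) then
      let m := aTry arr result i
      if m.1 > 0 ∧ m.2.1 > 1 then
        aMain arr f (m.2.2 + m.1 * m.2.1 - 1 + 1) (result ++ [(m.2.2, m.1, m.2.1)])
      else aMain arr f (i + 1) result
    else result

-- body of remove_pure_gdma's for loop; state = (new_index_arr, start_set); arr[i] is always in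
-- range here in Python (recorded blocks lie inside arr), so pyGetD's default is never used
def aRemoveStep (arr : List String) (st : List (Int × Int × Int) × PySem.Set Int)
    (idx : Int × Int × Int) : List (Int × Int × Int) × PySem.Set Int :=
  if idx.2.1 ≤ 1 then st
  else if PySem.Set.contains st.2 idx.1 then st
  else
    let count := (PySem.List.pyRange idx.1 (idx.1 + idx.2.1) 1).foldl
      (fun c j => if PySem.Str.startswith (PySem.List.pyGetD arr j "") "sg.dma" then c + 1 else c)
      (0 : Int)
    if count ≠ idx.2.1 then (st.1 ++ [idx], PySem.Set.add st.2 idx.1) else st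

def remove_pure_gdma (index_arr : List (Int × Int × Int)) (arr : List String) :
    List (Int × Int × Int) :=
  (index_arr.foldl (aRemoveStep arr) ([], PySem.Set.empty)).1

def find_repeated_subarrays (arr : List String) : List (Int × Int × Int) :=
  remove_pure_gdma (aMain arr (arr.length + 1) 0 []) arr

-- ===== PORT B =====
-- Source B's lcp-table loop: 'for a in reversed(range(n)): cur = [...]; cur.append(0); rows = [cur]+rows'
def bRows (arr : List String) : List (List Int) :=
  ((PySem.List.pyRange 0 (arr.length : Int) 1).reverse).foldl
    (fun rows a =>
      let prev := PySem.List.pyGetD rows 0 []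
      let cur := (PySem.List.pyRange 0 (arr.length : Int) 1).map
        (fun b => if PySem.List.pyGetD arr a "" = PySem.List.pyGetD arr b "" then
                    PySem.List.pyGetD prev (b + 1) 0 + 1 else 0)
      (cur ++ [0]) :: rows)
    [PySem.List.pyRepeat [0] ((arr.length : Int) + 1)]

-- Source B's 'for length in range(1, n-i+1)' loop; state = (best_len, best_cnt)
def bTry (arr : List String) (rows : List (List Int)) (i : Int) : Int × Int :=
  (PySem.List.pyRange 1 ((arr.length : Int) - i + 1) 1).foldl
    (fun m L =>
      let cnt := 1 + PySem.Int.floordiv (PySem.List.pyGetD (PySem.List.pyGetD rows i []) (i + L) 0) L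
      if cnt > 1 ∧ L * cnt > m.1 * m.2 then (L, cnt) else m)
    (0, 0)

-- Source B's 'while i < n' loop
def bMain (arr : List String) (rows : List (List Int)) (fuel : Nat) (i : Int)
    (result : List (Int × Int × Int)) : List (Int × Int × Int) :=
  match fuel with
  | 0 => result
  | f + 1 =>
    if i < (arr.length : Int) then
      let m := bTry arr rows i
      if m.1 > 0 then
        bMain arr rows f (i + m.1 * m.2) (result ++ [(i, m.1, m.2)])
      else bMain arr rows f (i + 1) result
    else result

def find_repeated_subarrays_alt (arr : List String) : List (Int × Int × Int) :=
  (bMain arr (bRows arr) (arr.length + 1) 0 []).filter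
    (fun t => decide (t.2.1 > 1) &&
      !((PySem.List.slice arr (some t.1) (some (t.1 + t.2.1))).all
          (fun x => PySem.Str.startswith x "sg.dma")))

-- ===== PRECONDITION & SPEC =====
def Spec_find_repeated_subarrays (arr : List String) (out : List (Int × Int × Int)) : Prop := out = find_repeated_subarrays_alt arr
instance (arr : List String) (out : List (Int × Int × Int)) : Decidable (Spec_find_repeated_subarrays arr out) := by unfold Spec_find_repeated_subarrays; infer_instance

-- ===== CLAIM (what is proved, stated in full; the proofs are below) =====
def Claim_equal_find_repeated_subarrays : Prop := ∀ (arr : List String), Dom_find_repeated_subarrays arr → Spec_find_repeated_subarrays arr (find_repeated_subarrays arr)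

-- ===== LEMMAS AND PROOFS =====

-- longest common prefix of two suffix lists: the value both programs' repeat counts reduce to
def lcp : List String → List String → Nat
  | x :: xs, y :: ys => if x = y then lcp xs ys + 1 else 0
  | _, _ => 0
theorem lcp_nil_right (xs : List String) : lcp xs [] = 0 := by cases xs <;> rfl

theorem lcp_ge_iff (xs ys : List String) (k : Nat) :
    k ≤ lcp xs ys ↔ k ≤ xs.length ∧ k ≤ ys.length ∧ ∀ t < k, xs.getD t "" = ys.getD t "" := by
  induction xs generalizing ys k with
  | nil =>
    simp only [lcp, List.length_nil, Nat.le_zero]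
    constructor
    · intro h; subst h; simp
    · rintro ⟨h, -, -⟩; omega
  | cons x xs ih =>
    cases ys with
    | nil =>
      rw [lcp_nil_right]
      constructor
      · intro h; simp at h; subst h; simp
      · rintro ⟨-, h, -⟩; simp at h; omega
    | cons y ys =>
      cases k with
      | zero => simp
      | succ k =>
        by_cases hxy : x = y
        · subst hxy
          have hl : lcp (x :: xs) (x :: ys) = lcp xs ys + 1 := by simp [lcp]
          rw [hl, List.length_cons, List.length_cons, Nat.add_le_add_iff_right, ih ys k]
          constructor
          · rintro ⟨h1, h2, h3⟩
            refine ⟨by omega, by omega, ?_⟩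
            intro t ht
            cases t with
            | zero => rfl
            | succ t => simpa using h3 t (by omega)
          · rintro ⟨h1, h2, h3⟩
            refine ⟨by omega, by omega, ?_⟩
            intro t ht
            simpa using h3 (t + 1) (by omega)
        · simp only [lcp, if_neg hxy]
          constructor
          · intro h; omega
          · rintro ⟨-, -, h3⟩
            exact absurd (by simpa using h3 0 (by omega)) hxy

theorem lcp_le_right (xs ys : List String) : lcp xs ys ≤ ys.length :=
  ((lcp_ge_iff xs ys (lcp xs ys)).mp le_rfl).2.1

theorem getD_drop (xs : List String) (i t : Nat) (d : String) :
    (xs.drop i).getD t d = xs.getD (i + t) d := by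
  simp [List.getD_eq_getElem?_getD, List.getElem?_drop]

theorem block_eq_iff (arr : List String) (i j L : Nat) (hL : 1 ≤ L) (hi : i + L ≤ arr.length) :
    ((arr.drop i).take L = (arr.drop j).take L) ↔
      (j + L ≤ arr.length ∧ ∀ t < L, arr.getD (i + t) "" = arr.getD (j + t) "") := by
  have hlen1 : ((arr.drop i).take L).length = L := by
    simp [List.length_take, List.length_drop]; omega
  constructor
  · intro h
    have hlen2 : ((arr.drop j).take L).length = L := by rw [← h, hlen1]
    have hj : j + L ≤ arr.length := by
      simp [List.length_take, List.length_drop] at hlen2; omega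
    refine ⟨hj, fun t ht => ?_⟩
    have := congrArg (fun l => List.getD l t "") h
    simpa [List.getD_eq_getElem?_getD, List.getElem?_take, ht, List.getElem?_drop] using this
  · rintro ⟨hj, h⟩
    have hlen2 : ((arr.drop j).take L).length = L := by
      simp [List.length_take, List.length_drop]; omega
    apply List.ext_getElem (by rw [hlen1, hlen2])
    intro t h1 h2
    have ht : t < L := by omega
    have e := h t ht
    rw [List.getElem_take, List.getElem_take, List.getElem_drop, List.getElem_drop]
    have g1 : arr.getD (i + t) "" = arr[i + t] := List.getD_eq_getElem arr "" (by omega)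
    have g2 : arr.getD (j + t) "" = arr[j + t] := List.getD_eq_getElem arr "" (by omega)
    rw [g1, g2] at e; exact e

theorem periodic_reach (arr : List String) (i L k : Nat)
    (h : ∀ t < k * L, arr.getD (i + t) "" = arr.getD (i + L + t) "") :
    ∀ s < L, arr.getD (i + s) "" = arr.getD (i + k * L + s) "" := by
  induction k with
  | zero => intro s _; simp
  | succ k ih =>
    intro s hs
    have h1 := ih (fun t ht => h t (by nlinarith)) s hs
    have h2 := h (k * L + s) (by nlinarith)
    have e3 : arr.getD (i + k * L + s) "" = arr.getD (i + (k + 1) * L + s) "" := by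
      simpa [show i + (k * L + s) = i + k * L + s by ring,
        show i + L + (k * L + s) = i + (k + 1) * L + s by ring] using h2
    exact h1.trans e3

theorem cond_iff (arr : List String) (i L c : Nat) (hL : 1 ≤ L) (hiL : i + L ≤ arr.length)
    (hc : 1 ≤ c) (hinv : (c - 1) * L ≤ lcp (arr.drop i) (arr.drop (i + L))) :
    ((i + c * L < arr.length) ∧ (arr.drop i).take L = (arr.drop (i + L * c)).take L) ↔
      c * L ≤ lcp (arr.drop i) (arr.drop (i + L)) := by
  have hchar : ∀ m : Nat, m ≤ lcp (arr.drop i) (arr.drop (i + L)) ↔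
      (m ≤ arr.length - i ∧ m ≤ arr.length - (i + L) ∧
        ∀ t < m, arr.getD (i + t) "" = arr.getD (i + L + t) "") := by
    intro m
    rw [lcp_ge_iff]
    simp only [List.length_drop, getD_drop]
  have hinv' := (hchar _).mp hinv
  rw [hchar]
  rw [block_eq_iff arr i (i + L * c) L hL hiL, Nat.mul_comm L c]
  constructor
  · rintro ⟨h1, h2, h3⟩
    have hcl : (c - 1) * L + L = c * L := by
      cases c with
      | zero => omega
      | succ c => simp only [Nat.add_sub_cancel]; ring
    refine ⟨by omega, by omega, ?_⟩
    intro t ht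
    by_cases htc : t < (c - 1) * L
    · exact hinv'.2.2 t htc
    · -- t = (c-1)*L + s with s < L
      obtain ⟨s, hsL, rfl⟩ : ∃ s, s < L ∧ t = (c - 1) * L + s := by
        refine ⟨t - (c - 1) * L, by omega, by omega⟩
      have e1 : arr.getD (i + s) "" = arr.getD (i + (c - 1) * L + s) "" :=
        periodic_reach arr i L (c - 1) hinv'.2.2 s hsL
      have e2 : arr.getD (i + s) "" = arr.getD (i + c * L + s) "" := h3 s hsL
      have i1 : i + ((c - 1) * L + s) = i + (c - 1) * L + s := by ring
      have i2 : i + L + ((c - 1) * L + s) = i + c * L + s := by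
        cases c with
        | zero => omega
        | succ c => simp only [Nat.add_sub_cancel]; ring
      rw [i1, i2, ← e1]
      exact e2
  · intro h
    have hcL : i + c * L < arr.length := by
      have := h.2.1
      omega
    refine ⟨hcL, by omega, ?_⟩
    intro s hsL
    have e := periodic_reach arr i L c h.2.2 s hsL
    rw [e]

theorem countLoop_eq (arr : List String) (i L : Nat) (hL : 1 ≤ L) (hiL : i + L ≤ arr.length) :
    ∀ (fuel c : Nat), 1 ≤ c → (c - 1) * L ≤ lcp (arr.drop i) (arr.drop (i + L)) →
      lcp (arr.drop i) (arr.drop (i + L)) / L + 2 ≤ fuel + c →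
      aCountLoop arr (i : Int) (L : Int) fuel (c : Int) =
        ((lcp (arr.drop i) (arr.drop (i + L)) / L + 1 : Nat) : Int) := by
  intro fuel
  induction fuel with
  | zero =>
    intro c hc hinv hfe
    exfalso
    have : c - 1 ≤ lcp (arr.drop i) (arr.drop (i + L)) / L :=
      (Nat.le_div_iff_mul_le (by omega)).mpr hinv
    omega
  | succ f ih =>
    intro c hc hinv hfe
    have hs1 : PySem.List.slice arr (some (i : Int)) (some ((i : Int) + (L : Int)))
        = (arr.drop i).take L := PySem.List.slice_natCast_add arr i L
    have hs2 : PySem.List.slice arr (some ((i : Int) + (L : Int) * (c : Int)))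
        (some ((i : Int) + (L : Int) * ((c : Int) + 1))) = (arr.drop (i + L * c)).take L := by
      have h1 : (i : Int) + (L : Int) * (c : Int) = ((i + L * c : Nat) : Int) := by push_cast; ring
      have h2 : (i : Int) + (L : Int) * ((c : Int) + 1) = ((i + L * c : Nat) : Int) + ((L : Nat) : Int) := by
        push_cast; ring
      rw [h1, h2, PySem.List.slice_natCast_add]
    show (if _ then _ else _) = _
    rw [hs1, hs2]
    have hiff := cond_iff arr i L c hL hiL hc hinv
    by_cases hcase : c * L ≤ lcp (arr.drop i) (arr.drop (i + L))
    · rw [if_pos]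
      · have := ih (c + 1) (by omega) (by simpa using hcase) (by omega)
        rw [show ((c : Int) + 1) = ((c + 1 : Nat) : Int) by push_cast; ring]
        exact this
      · exact ⟨by exact_mod_cast (hiff.mpr hcase).1, (hiff.mpr hcase).2⟩
    · rw [if_neg]
      · have hglt : lcp (arr.drop i) (arr.drop (i + L)) < c * L := Nat.lt_of_not_le hcase
        have hub : lcp (arr.drop i) (arr.drop (i + L)) / L < c :=
          (Nat.div_lt_iff_lt_mul (by omega)).mpr hglt
        have hlb : c - 1 ≤ lcp (arr.drop i) (arr.drop (i + L)) / L :=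
          (Nat.le_div_iff_mul_le (by omega)).mpr hinv
        have hce : c = lcp (arr.drop i) (arr.drop (i + L)) / L + 1 := by omega
        exact_mod_cast hce
      · intro hcond
        exact hcase (hiff.mp ⟨by exact_mod_cast hcond.1, hcond.2⟩)

def rowSpec (arr : List String) (a : Nat) : List Int :=
  (List.range (arr.length + 1)).map (fun b => (lcp (arr.drop a) (arr.drop b) : Int))

def RS (arr : List String) (m : Nat) : List (List Int) :=
  (List.range' m (arr.length + 1 - m)).map (rowSpec arr)

theorem rowSpec_last (arr : List String) : rowSpec arr arr.length = List.replicate (arr.length + 1) 0 := by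
  unfold rowSpec
  rw [List.eq_replicate_iff]
  constructor
  · simp
  · intro b hb
    simp only [List.mem_map] at hb
    obtain ⟨k, -, rfl⟩ := hb
    simp [lcp]

theorem step_RS (arr : List String) (m : Nat) (hm : m < arr.length) :
    (((PySem.List.pyRange 0 (arr.length : Int) 1).map
        (fun b => if PySem.List.pyGetD arr (m : Int) "" = PySem.List.pyGetD arr b "" then
                    PySem.List.pyGetD (PySem.List.pyGetD (RS arr (m + 1)) 0 []) (b + 1) 0 + 1 else 0))
      ++ [0]) :: RS arr (m + 1) = RS arr m := by
  have hsplit : RS arr (m + 1) = rowSpec arr (m + 1) :: (List.range' (m + 2) (arr.length - m - 1)).map (rowSpec arr) := by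
    unfold RS
    rw [show arr.length + 1 - (m + 1) = (arr.length - m - 1) + 1 by omega, List.range'_succ]
    simp
  rw [hsplit]
  have hprev : PySem.List.pyGetD (rowSpec arr (m + 1) :: (List.range' (m + 2) (arr.length - m - 1)).map (rowSpec arr)) 0 [] = rowSpec arr (m + 1) := by
    rw [show (0 : Int) = ((0 : Nat) : Int) by rfl, PySem.List.pyGetD_natCast]
    rfl
  rw [hprev]
  have hcur : ((PySem.List.pyRange 0 (arr.length : Int) 1).map
        (fun b => if PySem.List.pyGetD arr (m : Int) "" = PySem.List.pyGetD arr b "" then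
                    PySem.List.pyGetD (rowSpec arr (m + 1)) (b + 1) 0 + 1 else 0)) ++ [0] = rowSpec arr m := by
    rw [PySem.List.pyRange_zero_nat, List.map_map]
    conv_rhs => rw [rowSpec, show arr.length + 1 = arr.length.succ from rfl, List.range_succ,
      List.map_append]
    congr 1
    · apply List.map_congr_left
      intro b hb
      rw [List.mem_range] at hb
      simp only [Function.comp_apply]
      rw [PySem.List.pyGetD_natCast, PySem.List.pyGetD_natCast,
        show ((b : Int) + 1) = ((b + 1 : Nat) : Int) by push_cast; ring, PySem.List.pyGetD_natCast]
      simp only [rowSpec]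
      rw [PySem.List.getD_map_range _ _ _ _ (by omega)]
      have hdm : arr.drop m = arr[m] :: arr.drop (m + 1) := List.drop_eq_getElem_cons hm
      have hdb : arr.drop b = arr[b] :: arr.drop (b + 1) := List.drop_eq_getElem_cons hb
      rw [hdm, hdb]
      have gm : arr.getD m "" = arr[m] := List.getD_eq_getElem arr "" hm
      have gb : arr.getD b "" = arr[b] := List.getD_eq_getElem arr "" hb
      rw [gm, gb]
      by_cases h : arr[m] = arr[b]
      · rw [if_pos h, show lcp (arr[m] :: arr.drop (m+1)) (arr[b] :: arr.drop (b+1)) = lcp (arr.drop (m+1)) (arr.drop (b+1)) + 1 by simp [lcp, h]]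
        push_cast
        ring_nf
      · rw [if_neg h, show lcp (arr[m] :: arr.drop (m+1)) (arr[b] :: arr.drop (b+1)) = 0 by simp [lcp, h]]
        rfl
    · simp [show arr.drop arr.length = [] by simp, lcp_nil_right]
  rw [hcur]
  unfold RS
  rw [show arr.length + 1 - m = (arr.length - m) + 1 by omega, List.range'_succ,
    show arr.length - m = (arr.length - m - 1) + 1 by omega, List.range'_succ]
  simp

theorem bRows_eq (arr : List String) :
    bRows arr = (List.range (arr.length + 1)).map (rowSpec arr) := by
  have key : ∀ m ≤ arr.length,
      (List.map (Nat.cast : Nat → Int) (List.range m).reverse).foldl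
        (fun rows a =>
          let prev := PySem.List.pyGetD rows 0 []
          let cur := (PySem.List.pyRange 0 (arr.length : Int) 1).map
            (fun b => if PySem.List.pyGetD arr a "" = PySem.List.pyGetD arr b "" then
                        PySem.List.pyGetD prev (b + 1) 0 + 1 else 0)
          (cur ++ [0]) :: rows) (RS arr m) = RS arr 0 := by
    intro m
    induction m with
    | zero => intro _; simp
    | succ m ih =>
      intro hm
      rw [List.range_succ, List.reverse_append, List.reverse_singleton, List.singleton_append, List.map_cons, List.foldl_cons]
      simp only [step_RS arr m (by omega)]
      exact ih (by omega)
  unfold bRows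
  have hlist : (PySem.List.pyRange 0 (arr.length : Int) 1).reverse
      = List.map (Nat.cast : Nat → Int) (List.range arr.length).reverse := by
    rw [PySem.List.pyRange_zero_nat, ← List.map_reverse]
  have hinit : [PySem.List.pyRepeat [(0 : Int)] ((arr.length : Int) + 1)] = RS arr arr.length := by
    rw [PySem.List.pyRepeat_singleton]
    unfold RS
    rw [show arr.length + 1 - arr.length = 1 by omega]
    simp [rowSpec_last]
  rw [hlist, hinit, key arr.length le_rfl]
  unfold RS
  rw [Nat.sub_zero, ← List.range_eq_range']

theorem bLookup (arr : List String) (i k : Nat) (hi : i ≤ arr.length) (hk : k ≤ arr.length) :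
    PySem.List.pyGetD (PySem.List.pyGetD (bRows arr) (i : Int) []) (k : Int) 0 =
      ((lcp (arr.drop i) (arr.drop k) : Nat) : Int) := by
  rw [bRows_eq,
    PySem.List.pyGetD_natCast (List.map (rowSpec arr) (List.range (arr.length + 1))) i [],
    PySem.List.getD_map_range _ _ _ _ (show i < arr.length + 1 by omega)]
  simp only [rowSpec]
  rw [PySem.List.pyGetD_natCast, PySem.List.getD_map_range _ _ _ _ (show k < arr.length + 1 by omega)]


-- a recorded block: natural components, length >= 1, count >= 2, entirely inside arr
def Good (arr : List String) (t : Int × Int × Int) : Prop :=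
  ∃ s l c : Nat, t = ((s : Int), (l : Int), (c : Int)) ∧ 1 ≤ l ∧ 2 ≤ c ∧ s + l * c ≤ arr.length

-- state of the length loop: still (0,0), or a recorded candidate
def StOK (arr : List String) (i : Nat) (m : Int × Int) : Prop :=
  (m = (0, 0)) ∨ ∃ l c : Nat, m = ((l : Int), (c : Int)) ∧ 1 ≤ l ∧ 2 ≤ c ∧ i + l * c ≤ arr.length

def LoopInv (arr : List String) (i : Nat) (result : List (Int × Int × Int)) : Prop :=
  (∀ t ∈ result, Good arr t ∧ t.1 + t.2.1 * t.2.2 ≤ (i : Int)) ∧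
    result.Pairwise (fun x y => x.1 + x.2.1 * x.2.2 ≤ y.1)

theorem overlap_false (result : List (Int × Int × Int)) (i : Nat)
    (hov : ∀ t ∈ result, t.1 + t.2.1 * t.2.2 ≤ (i : Int)) (L C : Int) :
    aOverlap result (i : Int) L C = false := by
  unfold aOverlap
  rw [List.any_eq_false]
  intro t ht
  have h := hov t ht
  simp [h]

theorem try_fold (arr : List String) (rows : List (List Int))
    (hB : ∀ a k : Nat, a ≤ arr.length → k ≤ arr.length →
      PySem.List.pyGetD (PySem.List.pyGetD rows (a : Int) []) (k : Int) 0 =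
        ((lcp (arr.drop a) (arr.drop k) : Nat) : Int))
    (result : List (Int × Int × Int)) (i : Nat)
    (hov : ∀ t ∈ result, t.1 + t.2.1 * t.2.2 ≤ (i : Int)) (hi : i ≤ arr.length) :
    ∀ (lst : List Int), (∀ L ∈ lst, ∃ Ln : Nat, L = (Ln : Int) ∧ 1 ≤ Ln ∧ i + Ln ≤ arr.length) →
    ∀ (st : Int × Int), StOK arr i st →
      lst.foldl
        (fun m L =>
          let count := aCountLoop arr (i : Int) L (arr.length + 1) 1
          if count > 1 ∧ L * count > m.1 * m.2.1 then
            if aOverlap result (i : Int) L count = false then (L, count, (i : Int)) else m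
          else m)
        (st.1, st.2, (i : Int)) =
      ((lst.foldl
          (fun m L =>
            let cnt := 1 + PySem.Int.floordiv
              (PySem.List.pyGetD (PySem.List.pyGetD rows (i : Int) []) ((i : Int) + L) 0) L
            if cnt > 1 ∧ L * cnt > m.1 * m.2 then (L, cnt) else m)
          st).1,
        (lst.foldl
          (fun m L =>
            let cnt := 1 + PySem.Int.floordiv
              (PySem.List.pyGetD (PySem.List.pyGetD rows (i : Int) []) ((i : Int) + L) 0) L
            if cnt > 1 ∧ L * cnt > m.1 * m.2 then (L, cnt) else m)
          st).2, (i : Int)) ∧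
      StOK arr i (lst.foldl
          (fun m L =>
            let cnt := 1 + PySem.Int.floordiv
              (PySem.List.pyGetD (PySem.List.pyGetD rows (i : Int) []) ((i : Int) + L) 0) L
            if cnt > 1 ∧ L * cnt > m.1 * m.2 then (L, cnt) else m)
          st) := by
  intro lst
  induction lst with
  | nil => intro _ st hst; exact ⟨rfl, hst⟩
  | cons L rest ih =>
    intro hmem st hst
    obtain ⟨Ln, rfl, hLn1, hLnle⟩ := hmem L (List.mem_cons_self)
    set g := lcp (arr.drop i) (arr.drop (i + Ln)) with hg
    have hgle : g ≤ arr.length := le_trans (lcp_le_right _ _) (by simp [List.length_drop])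
    have hcountA : aCountLoop arr (i : Int) (Ln : Int) (arr.length + 1) 1 = ((g / Ln + 1 : Nat) : Int) := by
      have h := countLoop_eq arr i Ln hLn1 hLnle (arr.length + 1) 1 le_rfl (by simp)
        (by
          have h1 := Nat.div_le_self (lcp (arr.drop i) (arr.drop (i + Ln))) Ln
          have h2 := lcp_le_right (arr.drop i) (arr.drop (i + Ln))
          simp only [List.length_drop] at h2
          omega)
      rw [← hg] at h
      simpa using h
    have hcountB : (1 : Int) + PySem.Int.floordiv
        (PySem.List.pyGetD (PySem.List.pyGetD rows (i : Int) []) ((i : Int) + (Ln : Int)) 0) (Ln : Int)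
        = ((g / Ln + 1 : Nat) : Int) := by
      rw [show (i : Int) + (Ln : Int) = ((i + Ln : Nat) : Int) by push_cast; ring]
      rw [hB i (i + Ln) hi (by omega), PySem.Int.floordiv_natCast]
      push_cast; ring
    simp only [List.foldl_cons]
    rw [hcountA, hcountB]
    have hrest : ∀ L ∈ rest, ∃ Ln : Nat, L = (Ln : Int) ∧ 1 ≤ Ln ∧ i + Ln ≤ arr.length :=
      fun L hL => hmem L (List.mem_cons_of_mem _ hL)
    by_cases hcond : ((g / Ln + 1 : Nat) : Int) > 1 ∧ (Ln : Int) * ((g / Ln + 1 : Nat) : Int) > st.1 * st.2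
    · rw [if_pos hcond, if_pos hcond, overlap_false result i hov, if_pos rfl]
      have hc2 : 2 ≤ g / Ln + 1 := by
        have h1 := hcond.1
        have : (1 : Int) < ((g / Ln + 1 : Nat) : Int) := h1
        exact_mod_cast this
      have hbound : i + Ln * (g / Ln + 1) ≤ arr.length := by
        have hq : g / Ln * Ln ≤ g := Nat.div_mul_le_self g Ln
        have hg2 : g ≤ arr.length - (i + Ln) := by
          have := lcp_le_right (arr.drop i) (arr.drop (i + Ln))
          simpa [List.length_drop] using this
        have he : Ln * (g / Ln + 1) = g / Ln * Ln + Ln := by ring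
        omega
      exact ih hrest ((Ln : Int), ((g / Ln + 1 : Nat) : Int))
        (Or.inr ⟨Ln, g / Ln + 1, rfl, hLn1, hc2, hbound⟩)
    · rw [if_neg hcond, if_neg hcond]
      exact ih hrest st hst

theorem try_eq (arr : List String) (result : List (Int × Int × Int)) (i : Nat)
    (hov : ∀ t ∈ result, t.1 + t.2.1 * t.2.2 ≤ (i : Int)) (hi : i ≤ arr.length) :
    aTry arr result (i : Int) =
      ((bTry arr (bRows arr) (i : Int)).1, (bTry arr (bRows arr) (i : Int)).2, (i : Int)) ∧
      StOK arr i (bTry arr (bRows arr) (i : Int)) := by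
  have hmem : ∀ L ∈ PySem.List.pyRange 1 ((arr.length : Int) - (i : Int) + 1) 1,
      ∃ Ln : Nat, L = (Ln : Int) ∧ 1 ≤ Ln ∧ i + Ln ≤ arr.length := by
    intro L hL
    rw [PySem.List.mem_pyRange_one] at hL
    refine ⟨L.toNat, by omega, by omega, by omega⟩
  have h := try_fold arr (bRows arr) (fun a k ha hk => bLookup arr a k ha hk) result i hov hi
    (PySem.List.pyRange 1 ((arr.length : Int) - (i : Int) + 1) 1) hmem (0, 0) (Or.inl rfl)
  exact h

theorem main_eq (arr : List String) : ∀ (fuel : Nat) (i : Nat) (result : List (Int × Int × Int)),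
    LoopInv arr i result →
    aMain arr fuel (i : Int) result = bMain arr (bRows arr) fuel (i : Int) result ∧
      (∀ t ∈ aMain arr fuel (i : Int) result, Good arr t) ∧
      (aMain arr fuel (i : Int) result).Pairwise (fun x y => x.1 + x.2.1 * x.2.2 ≤ y.1) := by
  intro fuel
  induction fuel with
  | zero =>
    intro i result hinv
    exact ⟨rfl, fun t ht => (hinv.1 t ht).1, hinv.2⟩
  | succ f ih =>
    intro i result hinv
    by_cases hlt : (i : Int) < (arr.length : Int)
    · have hile : i ≤ arr.length := by omega
      obtain ⟨heqtry, hstok⟩ := try_eq arr result i (fun t ht => (hinv.1 t ht).2) hile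
      rcases hbt : bTry arr (bRows arr) (i : Int) with ⟨p1, p2⟩
      rw [hbt] at heqtry hstok
      rcases hstok with hz | ⟨l, c, hpe, hl1, hc2, hbound⟩
      · rw [Prod.mk.injEq] at hz
        obtain ⟨h1, h2⟩ := hz
        subst h1; subst h2
        have hA : aMain arr (f + 1) (i : Int) result = aMain arr f ((i : Int) + 1) result := by
          show (if _ then _ else _) = _
          rw [if_pos hlt]
          simp only [heqtry]
          rw [if_neg (by norm_num)]
        have hBm : bMain arr (bRows arr) (f + 1) (i : Int) result
            = bMain arr (bRows arr) f ((i : Int) + 1) result := by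
          show (if _ then _ else _) = _
          rw [if_pos hlt, hbt]
          rw [if_neg (by norm_num)]
        rw [hA, hBm]
        have hinv' : LoopInv arr (i + 1) result := by
          refine ⟨fun t ht => ⟨(hinv.1 t ht).1, ?_⟩, hinv.2⟩
          have := (hinv.1 t ht).2
          push_cast
          omega
        have := ih (i + 1) result hinv'
        rw [show ((i + 1 : Nat) : Int) = (i : Int) + 1 by push_cast; ring] at this
        exact this
      · rw [Prod.mk.injEq] at hpe
        obtain ⟨h1, h2⟩ := hpe
        subst h1; subst h2
        have hl0 : ((l : Int) > 0) := by exact_mod_cast hl1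
        have hc1 : ((c : Int) > 1) := by exact_mod_cast hc2
        have hstep : (i : Int) + (l : Int) * (c : Int) - 1 + 1 = ((i + l * c : Nat) : Int) := by
          push_cast; ring
        have hstep2 : (i : Int) + (l : Int) * (c : Int) = ((i + l * c : Nat) : Int) := by
          push_cast; ring
        have hA : aMain arr (f + 1) (i : Int) result
            = aMain arr f (((i + l * c : Nat)) : Int) (result ++ [((i : Int), (l : Int), (c : Int))]) := by
          show (if _ then _ else _) = _
          rw [if_pos hlt]
          simp only [heqtry]
          rw [if_pos ⟨hl0, hc1⟩, hstep]
        have hBm : bMain arr (bRows arr) (f + 1) (i : Int) result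
            = bMain arr (bRows arr) f (((i + l * c : Nat)) : Int)
                (result ++ [((i : Int), (l : Int), (c : Int))]) := by
          show (if _ then _ else _) = _
          rw [if_pos hlt, hbt]
          rw [if_pos hl0, hstep2]
        rw [hA, hBm]
        have hinv' : LoopInv arr (i + l * c) (result ++ [((i : Int), (l : Int), (c : Int))]) := by
          constructor
          · intro t ht
            rcases List.mem_append.mp ht with h1 | h2
            · refine ⟨(hinv.1 t h1).1, ?_⟩
              have := (hinv.1 t h1).2
              push_cast
              omega
            · rw [List.mem_singleton] at h2
              subst h2
              refine ⟨⟨i, l, c, rfl, hl1, hc2, hbound⟩, ?_⟩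
              push_cast
              omega
          · rw [List.pairwise_append]
            refine ⟨hinv.2, List.pairwise_singleton _ _, ?_⟩
            intro t ht t' ht'
            rw [List.mem_singleton] at ht'
            subst ht'
            exact (hinv.1 t ht).2
        exact ih (i + l * c) (result ++ [((i : Int), (l : Int), (c : Int))]) hinv'
    · have hA : aMain arr (f + 1) (i : Int) result = result := by
        show (if _ then _ else _) = _
        rw [if_neg hlt]
      have hBm : bMain arr (bRows arr) (f + 1) (i : Int) result = result := by
        show (if _ then _ else _) = _
        rw [if_neg hlt]
      rw [hA, hBm]
      exact ⟨rfl, fun t ht => (hinv.1 t ht).1, hinv.2⟩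

theorem count_block (arr : List String) (s l : Nat) (hsl : s + l ≤ arr.length) :
    (PySem.List.pyRange (s : Int) ((s : Int) + (l : Int)) 1).foldl
      (fun c j => if PySem.Str.startswith (PySem.List.pyGetD arr j "") "sg.dma" then c + 1 else c)
      (0 : Int)
    = ((List.countP (fun x => PySem.Str.startswith x "sg.dma") ((arr.drop s).take l) : Nat) : Int) := by
  have hmap : (List.range l).map (fun (k : Nat) => PySem.List.pyGetD arr ((s : Int) + (k : Int)) "")
      = (arr.drop s).take l := by
    apply List.ext_getElem
    · simp [List.length_take, List.length_drop]; omega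
    · intro k h1 h2
      simp only [List.getElem_map, List.getElem_range, List.getElem_take, List.getElem_drop]
      rw [show ((s : Int) + (k : Int)) = ((s + k : Nat) : Int) by push_cast; ring,
        PySem.List.pyGetD_natCast]
      exact List.getD_eq_getElem arr "" (by simp at h1; omega)
  rw [PySem.List.pyRange_one]
  rw [show (((s : Int) + (l : Int)) - (s : Int)).toNat = l by omega]
  rw [List.foldl_map, ← hmap, List.countP_map]
  rw [PySem.List.foldl_count_if]
  simp only [zero_add]
  rfl

theorem remove_eq (arr : List String) : ∀ (res : List (Int × Int × Int)),
    (∀ t ∈ res, Good arr t) → res.Pairwise (fun x y => x.1 + x.2.1 * x.2.2 ≤ y.1) →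
    ∀ (acc : List (Int × Int × Int)) (S : PySem.Set Int),
      (∀ t ∈ res, PySem.Set.contains S t.1 = false) →
      (res.foldl (aRemoveStep arr) (acc, S)).1 =
        acc ++ res.filter (fun t => decide (t.2.1 > 1) &&
          !((PySem.List.slice arr (some t.1) (some (t.1 + t.2.1))).all
              (fun x => PySem.Str.startswith x "sg.dma"))) := by
  intro res
  induction res with
  | nil => intro _ _ acc S _; simp
  | cons t rest ih =>
    intro hgood hpw acc S hS
    obtain ⟨s, l, c, rfl, hl1, hc2, hslc⟩ := hgood _ (List.mem_cons_self)
    have hsl : s + l ≤ arr.length := by nlinarith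
    have hgood' : ∀ t ∈ rest, Good arr t := fun t ht => hgood t (List.mem_cons_of_mem _ ht)
    have hpw' := (List.pairwise_cons.mp hpw).2
    have hhead := (List.pairwise_cons.mp hpw).1
    rw [List.foldl_cons]
    have hslice : PySem.List.slice arr (some ((s : Nat) : Int))
        (some (((s : Nat) : Int) + ((l : Nat) : Int))) = (arr.drop s).take l :=
      PySem.List.slice_natCast_add arr s l
    by_cases hl : l = 1
    · -- length ≤ 1: A skips, B's filter drops
      subst hl
      have hA : aRemoveStep arr (acc, S) ((s : Int), (((1 : Nat)) : Int), (c : Int)) = (acc, S) := by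
        unfold aRemoveStep
        rw [if_pos (by norm_num)]
      rw [hA, List.filter_cons_of_neg (by simp)]
      exact ih hgood' hpw' acc S (fun t ht => hS t (List.mem_cons_of_mem _ ht))
    · have hl2 : (2 : Int) ≤ (l : Int) := by exact_mod_cast (by omega : 2 ≤ l)
      have hnotle : ¬(((s : Int), (l : Int), (c : Int)).2.1 ≤ 1) := by simp; omega
      have hcontains : PySem.Set.contains S ((s : Int), (l : Int), (c : Int)).1 = false :=
        hS _ (List.mem_cons_self)
      have hcount := count_block arr s l hsl
      set p : String → Bool := fun x => PySem.Str.startswith x "sg.dma" with hp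
      have hblklen : ((arr.drop s).take l).length = l := by
        simp [List.length_take, List.length_drop]; omega
      by_cases hall : ((arr.drop s).take l).all p
      · -- pure sg.dma block: count = l, A skips, filter drops
        have hc : List.countP p ((arr.drop s).take l) = l :=
          (List.countP_eq_length.mpr (List.all_eq_true.mp hall)).trans hblklen
        have hA : aRemoveStep arr (acc, S) ((s : Int), (l : Int), (c : Int)) = (acc, S) := by
          unfold aRemoveStep
          rw [if_neg hnotle, hcontains]
          simp only [Bool.false_eq_true, if_false]
          simp only [hcount, hc]
          simp
        rw [hA, List.filter_cons_of_neg (by simp [hslice, hall])]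
        exact ih hgood' hpw' acc S (fun t ht => hS t (List.mem_cons_of_mem _ ht))
      · -- mixed block: A appends, filter keeps
        have hc : List.countP p ((arr.drop s).take l) ≠ l := by
          intro hceq
          apply hall
          rw [List.all_eq_true]
          intro x hx
          exact List.countP_eq_length.mp (hceq.trans hblklen.symm) x hx
        have hA : aRemoveStep arr (acc, S) ((s : Int), (l : Int), (c : Int)) =
            (acc ++ [((s : Int), (l : Int), (c : Int))], PySem.Set.add S (s : Int)) := by
          unfold aRemoveStep
          rw [if_neg hnotle, hcontains]
          simp only [Bool.false_eq_true, if_false]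
          simp only [hcount]
          rw [if_pos (by exact_mod_cast hc)]
        have hSrec : ∀ t ∈ rest, PySem.Set.contains (PySem.Set.add S (s : Int)) t.1 = false := by
          intro t ht
          have hne : t.1 ≠ ((s : Int)) := by
            have hh : ((s : Int)) + (l : Int) * (c : Int) ≤ t.1 := hhead t ht
            have hlc : (1 : Int) ≤ (l : Int) * (c : Int) := by
              exact_mod_cast (by nlinarith : (1 : Nat) ≤ l * c)
            omega
          have hSt := hS t (List.mem_cons_of_mem _ ht)
          simp only [PySem.Set.add, PySem.Set.contains] at *
          by_cases hmem : List.contains S (s : Int)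
          · rw [if_pos hmem]
            exact hSt
          · rw [if_neg hmem]
            rw [List.contains_append]
            simp_all
        rw [hA, List.filter_cons_of_pos (by simp [hslice, hall]; omega)]
        rw [ih hgood' hpw' (acc ++ [((s : Int), (l : Int), (c : Int))]) (PySem.Set.add S (s : Int))
          hSrec]
        simp

-- ===== VERDICT (by name: the statement is the Claim_ definition above) =====
theorem find_repeated_subarrays_spec : Claim_equal_find_repeated_subarrays := by
  intro arr _
  unfold Spec_find_repeated_subarrays
  unfold find_repeated_subarrays find_repeated_subarrays_alt remove_pure_gdma
  have h0 : LoopInv arr 0 [] := by constructor <;> simp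
  have hm := main_eq arr (arr.length + 1) 0 []
  rw [show ((0 : Nat) : Int) = (0 : Int) by rfl] at hm
  obtain ⟨heq, hgood, hpw⟩ := hm h0
  rw [heq] at hgood hpw ⊢
  rw [remove_eq arr _ hgood hpw [] PySem.Set.empty (by intro t _; rfl)]
  simp
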